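-- pv_equiv track=rewrite | github.com/agvaibhav/Hashing | numbers_containing_1-2&3.py | is_digit_set
-- ===== SOURCE A (Python) =====
-- def is_digit_set(digit):
--     set = ['1','2','3']
--     for i in digit:
--         if i in set:
--             continue
--         else:
--             return False
--     return True
-- ===== SOURCE B (Python) =====
-- def is_digit_set(digit):
--     return digit.count('1') + digit.count('2') + digit.count('3') == len(digit)
-- ===== Notes on version B (the rewrite author's own statement) =====
-- stated objective: alternative
-- what changed: Replaces the per-character membership loop with early return by an arithmetic formulation: three staged str.count passes whose sum is compared to the string length (all chars are in {1,2,3} iff the counts of '1','2','3' add up to len).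
import Mathlib
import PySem

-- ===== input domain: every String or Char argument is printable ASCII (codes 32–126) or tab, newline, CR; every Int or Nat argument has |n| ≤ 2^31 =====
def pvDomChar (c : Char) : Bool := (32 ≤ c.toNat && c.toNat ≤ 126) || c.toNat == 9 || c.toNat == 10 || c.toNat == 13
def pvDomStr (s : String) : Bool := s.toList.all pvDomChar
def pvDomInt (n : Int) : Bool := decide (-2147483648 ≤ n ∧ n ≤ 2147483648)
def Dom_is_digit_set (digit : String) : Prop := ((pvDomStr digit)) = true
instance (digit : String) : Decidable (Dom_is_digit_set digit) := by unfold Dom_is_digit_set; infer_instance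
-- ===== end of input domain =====

-- B replaces the membership loop by an arithmetic formulation: sum of three character counts compared to the length (alternative).

-- ===== PORT A =====
-- loop over the characters with an early `return False` on the first char outside ['1','2','3']
def is_digit_set_loop (s : List Char) : Bool :=
  match s with
  | [] => true
  | i :: rest => if i ∈ ['1', '2', '3'] then is_digit_set_loop rest else false

def is_digit_set (digit : String) : Bool := is_digit_set_loop digit.toList

-- ===== PORT B =====
-- digit.count('1') + digit.count('2') + digit.count('3') == len(digit)
def is_digit_set_alt (digit : String) : Bool :=
  decide (((PySem.Str.count digit "1" : Int) + (PySem.Str.count digit "2" : Int)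
            + (PySem.Str.count digit "3" : Int)) = PySem.Str.len digit)

-- ===== PRECONDITION & SPEC =====
def Spec_is_digit_set (digit : String) (out : Bool) : Prop := out = is_digit_set_alt digit
instance (digit : String) (out : Bool) : Decidable (Spec_is_digit_set digit out) := by unfold Spec_is_digit_set; infer_instance

-- ===== CLAIM (what is proved, stated in full; the proofs are below) =====
def Claim_equal_is_digit_set : Prop := ∀ (digit : String), Dom_is_digit_set digit → Spec_is_digit_set digit (is_digit_set digit)

-- ===== LEMMAS AND PROOFS =====

-- Python str.count with a single-character needle is List.count of that character.
theorem chars_count_go_single (c : Char) (l : List Char) (fuel acc : Nat)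
    (h : l.length ≤ fuel) :
    PySem.Chars.count.go [c] fuel l acc = acc + l.count c := by
  induction l generalizing fuel acc with
  | nil => cases fuel <;> simp [PySem.Chars.count.go]
  | cons x t ih =>
    cases fuel with
    | zero => simp at h
    | succ f =>
      have hf : t.length ≤ f := by simpa using h
      by_cases hx : c = x
      · subst hx
        rw [show PySem.Chars.count.go [c] (f+1) (c :: t) acc
              = PySem.Chars.count.go [c] f t (acc + 1) by
            simp [PySem.Chars.count.go, List.isPrefixOf]]
        rw [ih _ _ hf, List.count_cons]
        simp; omega
      · have hpre : ([c].isPrefixOf (x :: t)) = false := by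
          simp [List.isPrefixOf]
          exact fun hcx => (hx hcx).elim
        rw [show PySem.Chars.count.go [c] (f+1) (x :: t) acc
              = PySem.Chars.count.go [c] f t acc by
            simp [PySem.Chars.count.go, hpre]]
        rw [ih _ _ hf, List.count_cons]
        have : (x == c) = false := by simpa using fun hcx => hx hcx.symm
        simp [this]

theorem chars_count_single (c : Char) (l : List Char) :
    PySem.Chars.count l [c] = l.count c := by
  simp [PySem.Chars.count, chars_count_go_single c l l.length 0 le_rfl]

-- the three counts together never exceed the length
theorem counts_le_length (l : List Char) :
    l.count '1' + l.count '2' + l.count '3' ≤ l.length := by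
  induction l with
  | nil => simp
  | cons x t ih =>
    simp only [List.count_cons, List.length_cons]
    by_cases h1 : x = '1' <;> by_cases h2 : x = '2' <;> by_cases h3 : x = '3' <;>
      simp_all <;> omega

-- A's loop equals B's arithmetic test, on the character list
theorem loop_eq_counts (l : List Char) :
    is_digit_set_loop l
      = decide (((l.count '1' : Int) + (l.count '2' : Int) + (l.count '3' : Int)) = l.length) := by
  induction l with
  | nil => simp [is_digit_set_loop]
  | cons x t ih =>
    have hle := counts_le_length t
    simp only [is_digit_set_loop, ih, List.count_cons, List.length_cons]
    by_cases h1 : x = '1' <;> by_cases h2 : x = '2' <;> by_cases h3 : x = '3' <;>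
      · rw [Bool.eq_iff_iff]
        simp_all
        try (push_cast; omega)

-- ===== VERDICT (by name: the statement is the Claim_ definition above) =====
theorem is_digit_set_spec : Claim_equal_is_digit_set := by
  intro digit _
  unfold Spec_is_digit_set is_digit_set is_digit_set_alt
  rw [loop_eq_counts]
  rw [PySem.Str.count_eq, PySem.Str.count_eq, PySem.Str.count_eq, PySem.Str.len_eq]
  have h1 : ("1" : String).toList = ['1'] := rfl
  have h2 : ("2" : String).toList = ['2'] := rfl
  have h3 : ("3" : String).toList = ['3'] := rfl
  rw [h1, h2, h3, chars_count_single, chars_count_single, chars_count_single]
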